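-- pv_equiv track=rewrite | github.com/pypi-data/pypi-mirror-371 | packages/wot-pdf/wot_pdf-1.0.8-py3-none-any.whl/wot_pdf/engines/enhanced_reportlab_engine.py | _clean_code_for_xml
-- ===== SOURCE A (Python) =====
-- import unicodedata
--
-- def _clean_code_for_xml(code: str) -> str:
--     """Clean code content for XML parsing while preserving all content"""
--     if not code:
--         return ""
--
--     # Step 1: Unicode normalization
--     code = unicodedata.normalize('NFKC', code)
--
--     # Step 2: Fix the most problematic XML patterns
--     # Replace XML-breaking characters with safe equivalents that preserve meaning
--     xml_safe_replacements = {
--         '&': '&amp;',   # Must be first - XML ampersand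
--         '<': '&lt;',    # XML less-than
--         '>': '&gt;',    # XML greater-than
--         '"': '&quot;',  # XML double quote
--         "'": '&#39;',   # XML single quote (in attributes)
--     }
--
--     for char, safe in xml_safe_replacements.items():
--         code = code.replace(char, safe)
--
--     # Step 3: Clean up whitespace but preserve structure
--     code = code.replace('\r\n', '\n')  # Normalize line endings
--     code = code.replace('\r', '\n')    # Mac line endings
--     code = code.replace('\t', '    ')  # Tabs to spaces for consistent display
--
--     return code
-- ===== SOURCE B (Python) =====
-- import unicodedata
--
-- _REPL = {'&': '&amp;', '<': '&lt;', '>': '&gt;', '"': '&quot;', "'": '&#39;', '\t': '    '}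
--
-- def _clean_code_for_xml(code: str) -> str:
--     """Single left-to-right pass: escape XML chars via a table and normalize line endings."""
--     if not code:
--         return ""
--     code = unicodedata.normalize('NFKC', code)
--     out = []
--     i = 0
--     n = len(code)
--     while i < n:
--         c = code[i]
--         if c == '\r':
--             out.append('\n')
--             i += 2 if i + 1 < n and code[i + 1] == '\n' else 1
--         else:
--             out.append(_REPL.get(c, c))
--             i += 1
--     return ''.join(out)
-- ===== Notes on version B (the rewrite author's own statement) =====
-- stated objective: alternative
-- what changed: A rewrites the whole string six times with sequential str.replace passes; B builds the result in one left-to-right cursor pass, mapping each character through a replacement table and collapsing both CRLF and lone CR line endings to LF by consuming the lookahead character.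
import Mathlib
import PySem

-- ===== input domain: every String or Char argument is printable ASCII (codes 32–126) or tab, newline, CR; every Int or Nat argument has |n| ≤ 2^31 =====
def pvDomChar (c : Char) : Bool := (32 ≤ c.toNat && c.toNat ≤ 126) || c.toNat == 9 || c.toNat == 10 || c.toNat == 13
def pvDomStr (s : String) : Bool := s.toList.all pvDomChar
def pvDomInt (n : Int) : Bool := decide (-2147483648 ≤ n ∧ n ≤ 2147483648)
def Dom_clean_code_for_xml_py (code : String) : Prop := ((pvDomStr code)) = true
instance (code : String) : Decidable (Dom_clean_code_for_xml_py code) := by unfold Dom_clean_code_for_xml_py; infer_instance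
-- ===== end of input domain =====

-- B replaces A's chain of six sequential full-string .replace passes with one
-- left-to-right cursor pass over the characters (objective: alternative, one pass).
-- In both ports unicodedata.normalize('NFKC', ·) is ported as the identity: it is
-- exact on the ASCII domain Dom_clean_code_for_xml_py (NFKC fixes every ASCII string).

-- ===== PORT A =====
def clean_code_for_xml_py (code : String) : String :=
  if code = "" then ""
  else
    -- Step 1: NFKC normalization — identity on the ASCII domain
    -- Step 2: the five xml_safe_replacements, in dict order
    let c1 := PySem.Str.replace code "&" "&amp;"
    let c2 := PySem.Str.replace c1 "<" "&lt;"
    let c3 := PySem.Str.replace c2 ">" "&gt;"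
    let c4 := PySem.Str.replace c3 "\"" "&quot;"
    let c5 := PySem.Str.replace c4 "'" "&#39;"
    -- Step 3: whitespace normalization
    let c6 := PySem.Str.replace c5 "\r\n" "\n"
    let c7 := PySem.Str.replace c6 "\r" "\n"
    PySem.Str.replace c7 "\t" "    "

-- ===== PORT B =====
-- the replacement table _REPL.get(c, c)
def pvEsc (c : Char) : List Char :=
  if c = '&' then "&amp;".toList
  else if c = '<' then "&lt;".toList
  else if c = '>' then "&gt;".toList
  else if c = '"' then "&quot;".toList
  else if c = '\'' then "&#39;".toList
  else if c = '\t' then "    ".toList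
  else [c]

-- the cursor loop: '\r' emits '\n' and consumes a following '\n'; otherwise table lookup
def pvClean : List Char → List Char
  | [] => []
  | '\r' :: '\n' :: rest => '\n' :: pvClean rest
  | '\r' :: rest => '\n' :: pvClean rest
  | c :: rest => pvEsc c ++ pvClean rest

def clean_code_for_xml_py_alt (code : String) : String :=
  if code = "" then "" else String.ofList (pvClean code.toList)

-- ===== PRECONDITION & SPEC =====
def Spec_clean_code_for_xml_py (code : String) (out : String) : Prop := out = clean_code_for_xml_py_alt code
instance (code : String) (out : String) : Decidable (Spec_clean_code_for_xml_py code out) := by unfold Spec_clean_code_for_xml_py; infer_instance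

-- ===== CLAIM (what is proved, stated in full; the proofs are below) =====
def Claim_equal_clean_code_for_xml_py : Prop := ∀ (code : String), Dom_clean_code_for_xml_py code → Spec_clean_code_for_xml_py code (clean_code_for_xml_py code)

-- ===== LEMMAS AND PROOFS =====

-- replace.go with enough fuel performs single-character substitution, as a flatMap
theorem go_single (o : Char) (new : List Char) :
    ∀ (fuel : Nat) (l acc : List Char), l.length ≤ fuel →
    PySem.Chars.replace.go [o] new fuel l acc
      = acc.reverse ++ l.flatMap (fun c => if c = o then new else [c]) := by
  intro fuel
  induction fuel with
  | zero => intro l acc h; cases l with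
    | nil => simp [PySem.Chars.replace.go]
    | cons c t => simp at h
  | succ n ih =>
    intro l acc h
    cases l with
    | nil => simp [PySem.Chars.replace.go]
    | cons c t =>
      rw [PySem.Chars.replace.go]
      by_cases hc : c = o
      · subst hc
        have hp : [c].isPrefixOf (c :: t) = true := by simp [List.isPrefixOf]
        simp only [hp, if_pos]
        rw [ih _ _ (by simpa using Nat.le_of_succ_le_succ h)]
        simp
      · have hp : [o].isPrefixOf (c :: t) = false := by
          simp [List.isPrefixOf]; exact fun hh => absurd hh.symm hc
        simp only [hp]
        rw [ih t (c :: acc) (by simpa using Nat.le_of_succ_le_succ h)]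
        simp [hc]

theorem replace_single (s : List Char) (o : Char) (new : List Char) :
    PySem.Chars.replace s [o] new = s.flatMap (fun c => if c = o then new else [c]) := by
  rw [PySem.Chars.replace]
  simp only [List.isEmpty_cons, Bool.false_eq_true, if_false]
  rw [go_single o new s.length s [] (le_refl _)]
  simp

def pvCrlf : List Char → List Char
  | [] => []
  | '\r' :: '\n' :: rest => '\n' :: pvCrlf rest
  | c :: rest => c :: pvCrlf rest

def pvF1 (c : Char) : List Char := if c = '&' then "&amp;".toList else [c]
def pvF2 (c : Char) : List Char := if c = '<' then "&lt;".toList else [c]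
def pvF3 (c : Char) : List Char := if c = '>' then "&gt;".toList else [c]
def pvF4 (c : Char) : List Char := if c = '"' then "&quot;".toList else [c]
def pvF5 (c : Char) : List Char := if c = '\'' then "&#39;".toList else [c]
def pvFr (c : Char) : List Char := if c = '\r' then ['\n'] else [c]
def pvFt (c : Char) : List Char := if c = '\t' then "    ".toList else [c]

def pvEscA (s : List Char) : List Char :=
  ((((s.flatMap pvF1).flatMap pvF2).flatMap pvF3).flatMap pvF4).flatMap pvF5

def pvE (c : Char) : List Char :=
  ((((pvF1 c).flatMap pvF2).flatMap pvF3).flatMap pvF4).flatMap pvF5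

theorem escA_nil : pvEscA [] = [] := rfl

theorem escA_cons (c : Char) (s : List Char) : pvEscA (c :: s) = pvE c ++ pvEscA s := by
  simp [pvEscA, pvE]

theorem pvE_eq (c : Char) (h1 : c ≠ '&') (h2 : c ≠ '<') (h3 : c ≠ '>') (h4 : c ≠ '"')
    (h5 : c ≠ '\'') : pvE c = [c] := by
  simp [pvE, pvF1, pvF2, pvF3, pvF4, pvF5, h1, h2, h3, h4, h5]

theorem pvE_no_cr (c : Char) (h : c ≠ '\r') : '\r' ∉ pvE c := by
  by_cases h1 : c = '&'; · subst h1; decide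
  by_cases h2 : c = '<'; · subst h2; decide
  by_cases h3 : c = '>'; · subst h3; decide
  by_cases h4 : c = '"'; · subst h4; decide
  by_cases h5 : c = '\''; · subst h5; decide
  rw [pvE_eq c h1 h2 h3 h4 h5]; simp [Ne.symm h]

theorem pvE_head (c : Char) : (pvE c).head? = some '&' ∨ (pvE c).head? = some c := by
  by_cases h1 : c = '&'; · subst h1; left; decide
  by_cases h2 : c = '<'; · subst h2; left; decide
  by_cases h3 : c = '>'; · subst h3; left; decide
  by_cases h4 : c = '"'; · subst h4; left; decide
  by_cases h5 : c = '\''; · subst h5; left; decide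
  rw [pvE_eq c h1 h2 h3 h4 h5]; right; rfl

theorem head5 (s : List Char) (h : s.head? ≠ some '\n') : (pvEscA s).head? ≠ some '\n' := by
  cases s with
  | nil => simp [escA_nil]
  | cons x t =>
    rw [escA_cons]
    have hx : x ≠ '\n' := by intro hc; exact h (by simp [hc])
    rcases pvE_head x with hh | hh
    · cases he : pvE x with
      | nil => rw [he] at hh; simp at hh
      | cons y ys =>
        rw [he] at hh; simp at hh; subst hh
        simp
    · cases he : pvE x with
      | nil => rw [he] at hh; simp at hh
      | cons y ys =>
        rw [he] at hh; simp at hh; subst hh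
        simpa using hx

theorem pvCrlf_cons_ne (c : Char) (t : List Char)
    (h : ¬(c = '\r' ∧ t.head? = some '\n')) : pvCrlf (c :: t) = c :: pvCrlf t := by
  rw [pvCrlf.eq_def]
  split
  · simp_all
  · simp_all
  · rename_i heq
    injection heq with h1 h2
    subst h1; subst h2; rfl

theorem pvCrlf_append (a b : List Char) (h : '\r' ∉ a) : pvCrlf (a ++ b) = a ++ pvCrlf b := by
  induction a with
  | nil => rfl
  | cons x t ih =>
    have hx : x ≠ '\r' := fun hc => h (by simp [hc])
    rw [List.cons_append, pvCrlf_cons_ne x (t ++ b) (fun hc => hx hc.1)]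
    rw [ih (fun hc => h (by simp [hc]))]
    rfl

theorem pvClean_cons_ne (c : Char) (t : List Char) (h : c ≠ '\r') :
    pvClean (c :: t) = pvEsc c ++ pvClean t := by
  rw [pvClean.eq_def]
  split
  · simp_all
  · simp_all
  · simp_all
  · rename_i heq
    injection heq with h1 h2
    subst h1; subst h2; rfl

theorem pvClean_cr (t : List Char) (h : t.head? ≠ some '\n') :
    pvClean ('\r' :: t) = '\n' :: pvClean t := by
  rw [pvClean.eq_def]
  split
  · simp_all
  · simp_all
  · rename_i heq
    injection heq with h1 h2
    subst h2; rfl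
  · rename_i hnc heq
    injection heq with h1 h2
    exact absurd h1.symm hnc

theorem perchar (c : Char) (h : c ≠ '\r') :
    ((pvE c).flatMap pvFr).flatMap pvFt = pvEsc c := by
  by_cases h1 : c = '&'; · subst h1; decide
  by_cases h2 : c = '<'; · subst h2; decide
  by_cases h3 : c = '>'; · subst h3; decide
  by_cases h4 : c = '"'; · subst h4; decide
  by_cases h5 : c = '\''; · subst h5; decide
  rw [pvE_eq c h1 h2 h3 h4 h5]
  by_cases h6 : c = '\t'; · subst h6; decide
  simp [pvFr, pvFt, pvEsc, h, h1, h2, h3, h4, h5, h6]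

theorem pipeline_eq (s : List Char) :
    ((pvCrlf (pvEscA s)).flatMap pvFr).flatMap pvFt = pvClean s := by
  induction s using pvClean.induct with
  | case1 => rfl
  | case2 rest ih =>
    have : pvEscA ('\r' :: '\n' :: rest) = '\r' :: '\n' :: pvEscA rest := by
      rw [escA_cons, escA_cons]; rfl
    rw [this]
    show (('\n' :: pvCrlf (pvEscA rest)).flatMap pvFr).flatMap pvFt = '\n' :: pvClean rest
    simp only [List.flatMap_cons]
    rw [← ih]
    rfl
  | case3 rest hne ih =>
    have hh : rest.head? ≠ some '\n' := by
      cases rest with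
      | nil => simp
      | cons x t => simp; intro hc; exact hne t (by rw [hc])
    have : pvEscA ('\r' :: rest) = '\r' :: pvEscA rest := by rw [escA_cons]; rfl
    rw [this]
    rw [pvCrlf_cons_ne '\r' (pvEscA rest) (fun hc => head5 rest hh hc.2)]
    simp only [List.flatMap_cons]
    rw [pvClean_cr rest hh, ← ih]
    rfl
  | case4 c rest _ hne ih =>
    have hc : c ≠ '\r' := fun hc => hne hc
    rw [escA_cons, pvCrlf_append _ _ (pvE_no_cr c hc)]
    simp only [List.flatMap_append]
    rw [perchar c hc, ih, pvClean_cons_ne c rest hc]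

theorem go_crlf :
    ∀ (fuel : Nat) (l acc : List Char), l.length ≤ fuel →
    PySem.Chars.replace.go ['\r','\n'] ['\n'] fuel l acc = acc.reverse ++ pvCrlf l := by
  intro fuel
  induction fuel with
  | zero => intro l acc h; cases l with
    | nil => simp [PySem.Chars.replace.go, pvCrlf]
    | cons c t => simp at h
  | succ n ih =>
    intro l acc h
    cases l with
    | nil => simp [PySem.Chars.replace.go, pvCrlf]
    | cons c t =>
      rw [PySem.Chars.replace.go]
      by_cases hp : ['\r','\n'].isPrefixOf (c :: t) = true
      · obtain ⟨rfl, t, rfl⟩ : c = '\r' ∧ ∃ t', t = '\n' :: t' := by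
          cases t with
          | nil => simp [List.isPrefixOf] at hp
          | cons x t' =>
            simp [List.isPrefixOf] at hp
            exact ⟨hp.1.symm, t', by simp [hp.2.symm]⟩
        simp only [hp, if_pos]
        rw [ih _ _ (by simp at h ⊢; omega)]
        simp [pvCrlf]
      · simp only [hp, Bool.false_eq_true, if_false]  -- hp : ¬ = true
        rw [ih t (c :: acc) (by simp at h ⊢; omega)]
        rw [pvCrlf_cons_ne]
        · simp
        · intro ⟨hc, ht⟩
          cases t with
          | nil => simp at ht
          | cons x t' =>
            simp at ht
            exact hp (by simp [List.isPrefixOf, hc, ht])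

theorem replace_crlf (s : List Char) :
    PySem.Chars.replace s ['\r', '\n'] ['\n'] = pvCrlf s := by
  rw [PySem.Chars.replace]
  simp only [List.isEmpty_cons, Bool.false_eq_true, if_false]
  rw [go_crlf s.length s [] (le_refl _)]
  simp

-- A's eight replace passes, at the character-list level, equal B's single pass
theorem chainA (s : List Char) :
    PySem.Chars.replace (PySem.Chars.replace (PySem.Chars.replace (PySem.Chars.replace
      (PySem.Chars.replace (PySem.Chars.replace (PySem.Chars.replace (PySem.Chars.replace
        s "&".toList "&amp;".toList) "<".toList "&lt;".toList) ">".toList "&gt;".toList)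
        "\"".toList "&quot;".toList) "'".toList "&#39;".toList) "\r\n".toList "\n".toList)
        "\r".toList "\n".toList) "\t".toList "    ".toList = pvClean s := by
  show PySem.Chars.replace (PySem.Chars.replace (PySem.Chars.replace (PySem.Chars.replace
      (PySem.Chars.replace (PySem.Chars.replace (PySem.Chars.replace (PySem.Chars.replace
        s ['&'] "&amp;".toList) ['<'] "&lt;".toList) ['>'] "&gt;".toList)
        ['"'] "&quot;".toList) ['\''] "&#39;".toList) ['\r', '\n'] ['\n'])
        ['\r'] ['\n']) ['\t'] "    ".toList = pvClean s
  rw [replace_single, replace_single, replace_single, replace_single, replace_single,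
      replace_crlf, replace_single, replace_single]
  exact pipeline_eq s

-- ===== VERDICT (by name: the statement is the Claim_ definition above) =====
theorem clean_code_for_xml_py_spec : Claim_equal_clean_code_for_xml_py := by
  intro code _
  unfold Spec_clean_code_for_xml_py clean_code_for_xml_py clean_code_for_xml_py_alt
  by_cases h : code = ""
  · simp [h]
  · simp only [h, if_false]
    simp only [PySem.Str.replace, String.toList_ofList]
    exact congrArg String.ofList (chainA code.toList)
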